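-- pv_equiv track=rewrite | github.com/jacksonks/IPC | AP2/Q1.py | ipva
-- ===== SOURCE A (Python) =====
-- def ipva(listas):
--     dic = {}
--     l12=[]
--     l34=[]
--     l5=[]
--     l6=[]
--     l7=[]
--     l8=[]
--     l9=[]
--     l0=[]
--     for i in range(len(listas)):
--         a=listas[i]
--         if(a[-1]=='1' or a[-1]=='2'):
--             l12.append(a)
--             dic[1]=l12
--         elif(a[-1]=='3' or a[-1]=='4'):
--             l34.append(a)
--             dic[2]=l34
--         elif(a[-1]=='5'):
--             l5.append(a)
--             dic[3]=l5
--         elif(a[-1]=='6'):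
--             l6.append(a)
--             dic[4]=l6
--         elif(a[-1]=='7'):
--             l7.append(a)
--             dic[5]=l7
--         elif(a[-1]=='8'):
--             l8.append(a)
--             dic[6]=l8
--         elif(a[-1]=='9'):
--             l9.append(a)
--             dic[7]=l9
--         elif(a[-1]=='0'):
--             l0.append(a)
--             dic[8]=l0
--
--     return dic
-- ===== SOURCE B (Python) =====
-- def ipva(listas):
--     key = {'1': 1, '2': 1, '3': 2, '4': 2, '5': 3, '6': 4, '7': 5, '8': 6, '9': 7, '0': 8}
--     order = []
--     for a in listas:
--         k = key.get(a[-1])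
--         if k is not None and k not in order:
--             order.append(k)
--     return {k: [a for a in listas if key.get(a[-1]) == k] for k in order}
-- ===== Notes on version B (the rewrite author's own statement) =====
-- stated objective: simpler
-- what changed: Replaces A's single pass with an 8-way elif chain over eight named accumulator lists by a char->key table: one cheap pass records each key's first appearance, then a dict comprehension builds each bucket by filtering the input per key.
import Mathlib
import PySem

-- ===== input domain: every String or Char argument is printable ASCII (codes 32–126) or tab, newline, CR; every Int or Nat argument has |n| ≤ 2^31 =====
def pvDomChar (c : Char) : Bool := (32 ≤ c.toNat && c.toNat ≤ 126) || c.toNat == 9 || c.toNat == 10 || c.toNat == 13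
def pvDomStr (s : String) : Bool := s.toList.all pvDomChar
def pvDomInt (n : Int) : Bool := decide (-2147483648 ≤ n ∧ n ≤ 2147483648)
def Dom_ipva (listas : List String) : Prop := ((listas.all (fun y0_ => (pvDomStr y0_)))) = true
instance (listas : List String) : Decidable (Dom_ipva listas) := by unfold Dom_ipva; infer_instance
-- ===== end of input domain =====

-- B groups the strings by a last-digit→key table (first-appearance key order, then one filter
-- per key) instead of A's single pass with an 8-way elif chain over eight named lists: simpler
-- decomposition, same return value.

-- ===== PORT A =====
structure AState where
  dic : PySem.Dict Int (List String)
  l12 : List String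
  l34 : List String
  l5 : List String
  l6 : List String
  l7 : List String
  l8 : List String
  l9 : List String
  l0 : List String
deriving Repr, DecidableEq

def ipvaStep (st : AState) (a : String) : AState :=
  match PySem.Str.pyGet? a (-1) with
  | none => st   -- a[-1] on the empty string: Python raises IndexError; excluded by Pre_ipva
  | some c =>
    if c == '1' || c == '2' then
      let l := st.l12 ++ [a]; { st with l12 := l, dic := st.dic.insert 1 l }
    else if c == '3' || c == '4' then
      let l := st.l34 ++ [a]; { st with l34 := l, dic := st.dic.insert 2 l }
    else if c == '5' then
      let l := st.l5 ++ [a]; { st with l5 := l, dic := st.dic.insert 3 l }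
    else if c == '6' then
      let l := st.l6 ++ [a]; { st with l6 := l, dic := st.dic.insert 4 l }
    else if c == '7' then
      let l := st.l7 ++ [a]; { st with l7 := l, dic := st.dic.insert 5 l }
    else if c == '8' then
      let l := st.l8 ++ [a]; { st with l8 := l, dic := st.dic.insert 6 l }
    else if c == '9' then
      let l := st.l9 ++ [a]; { st with l9 := l, dic := st.dic.insert 7 l }
    else if c == '0' then
      let l := st.l0 ++ [a]; { st with l0 := l, dic := st.dic.insert 8 l }
    else st

def ipva (listas : List String) : List (Int × List String) :=
  (listas.foldl ipvaStep ⟨PySem.Dict.empty, [], [], [], [], [], [], [], []⟩).dic.items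

-- ===== PORT B =====
def keyTable : PySem.Dict Char Int :=
  PySem.Dict.ofList [('1',1),('2',1),('3',2),('4',2),('5',3),('6',4),('7',5),('8',6),('9',7),('0',8)]

def keyOf (a : String) : Option Int :=
  match PySem.Str.pyGet? a (-1) with
  | none => none   -- a[-1] on the empty string: Python raises IndexError; excluded by Pre_ipva
  | some c => keyTable.get? c

def ordStep (o : List Int) (a : String) : List Int :=
  match keyOf a with
  | none => o
  | some k => if k ∈ o then o else o ++ [k]

def bkt (k : Int) (listas : List String) : List String :=
  listas.filter (fun a => keyOf a == some k)

def ipva_alt (listas : List String) : List (Int × List String) :=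
  let order := listas.foldl ordStep []
  order.map (fun k => (k, bkt k listas))

-- ===== PRECONDITION & SPEC =====
-- Pre_ excludes lists containing the empty string, on which A raises IndexError (a[-1]).
def Pre_ipva (listas : List String) : Prop := ∀ a ∈ listas, a ≠ ""
instance (listas : List String) : Decidable (Pre_ipva listas) := by unfold Pre_ipva; infer_instance
def pvWitness_ipva : List String := ["a1", "b3", "xx", "c 1", "z0"]

def Spec_ipva (listas : List String) (out : List (Int × List String)) : Prop := out = ipva_alt listas
instance (listas : List String) (out : List (Int × List String)) : Decidable (Spec_ipva listas out) := by unfold Spec_ipva; infer_instance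

-- ===== CLAIM (what is proved, stated in full; the proofs are below) =====
def Claim_equal_ipva : Prop := ∀ (listas : List String), Dom_ipva listas → Pre_ipva listas → Spec_ipva listas (ipva listas)

-- ===== LEMMAS AND PROOFS =====

theorem keyTable_get (c : Char) : keyTable.get? c =
    if c == '1' || c == '2' then some 1
    else if c == '3' || c == '4' then some 2
    else if c == '5' then some 3
    else if c == '6' then some 4
    else if c == '7' then some 5
    else if c == '8' then some 6
    else if c == '9' then some 7
    else if c == '0' then some 8
    else none := by
  rcases eq_or_ne c '1' with rfl|h1; · decide
  rcases eq_or_ne c '2' with rfl|h2; · decide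
  rcases eq_or_ne c '3' with rfl|h3; · decide
  rcases eq_or_ne c '4' with rfl|h4; · decide
  rcases eq_or_ne c '5' with rfl|h5; · decide
  rcases eq_or_ne c '6' with rfl|h6; · decide
  rcases eq_or_ne c '7' with rfl|h7; · decide
  rcases eq_or_ne c '8' with rfl|h8; · decide
  rcases eq_or_ne c '9' with rfl|h9; · decide
  rcases eq_or_ne c '0' with rfl|h0; · decide
  have h : keyTable = PySem.Dict.mk [('1',1),('2',1),('3',2),('4',2),('5',3),('6',4),('7',5),('8',6),('9',7),('0',8)] := by decide
  rw [h]
  simp [Ne.symm h1, Ne.symm h2, Ne.symm h3, Ne.symm h4, Ne.symm h5,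
    Ne.symm h6, Ne.symm h7, Ne.symm h8, Ne.symm h9, Ne.symm h0, h1, h2, h3, h4, h5, h6, h7, h8,
    h9, h0, PySem.Dict.get?]

theorem bkt_append (k : Int) (xs : List String) (a : String) :
    bkt k (xs ++ [a]) = bkt k xs ++ (if keyOf a == some k then [a] else []) := by
  simp only [bkt, List.filter_append]
  congr 1
  by_cases h : keyOf a == some k <;> simp [List.filter, h]

theorem items_step (order : List Int) (dic : PySem.Dict Int (List String))
    (f : Int → List String) (k : Int) (v : List String)
    (hitems : dic.items = order.map (fun j => (j, f j))) :
    (dic.insert k v).items =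
      (if k ∈ order then order else order ++ [k]).map
        (fun j => (j, if j = k then v else f j)) := by
  have hkeys : dic.keys = order := by
    simp [PySem.Dict.keys, hitems, Function.comp_def]
  have hcont : dic.contains k = decide (k ∈ order) := by
    rw [PySem.Dict.contains_eq_decide_mem_keys, hkeys]
  by_cases hm : k ∈ order
  · have hc : dic.contains k = true := by simp [hcont, hm]
    rw [PySem.Dict.items_insert_of_contains _ _ hc, hitems, List.map_map]
    simp only [hm, if_true]
    apply List.map_congr_left
    intro j _
    by_cases hj : j = k <;> simp [hj]
  · have hc : dic.contains k = false := by simp [hcont, hm]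
    rw [PySem.Dict.items_insert_of_not_contains _ _ hc, hitems]
    simp only [hm, if_false, List.map_append]
    congr 1
    · apply List.map_congr_left
      intro j hjmem
      have : j ≠ k := fun hh => hm (hh ▸ hjmem)
      simp [this]
    · simp

theorem dict_step (xs : List String) (a : String) (k : Int) (dic : PySem.Dict Int (List String))
    (hk : keyOf a = some k)
    (hitems : dic.items = (xs.foldl ordStep []).map (fun j => (j, bkt j xs))) :
    (dic.insert k (bkt k xs ++ [a])).items
      = (ordStep (xs.foldl ordStep []) a).map (fun j => (j, bkt j (xs ++ [a]))) := by
  rw [items_step _ _ _ _ _ hitems]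
  simp only [ordStep, hk]
  by_cases hm : k ∈ xs.foldl ordStep [] <;>
    simp only [hm, if_true, if_false] <;>
    · apply List.map_congr_left
      intro j _
      by_cases hj : j = k
      · simp [bkt_append, hk, hj]
      · have hkj : ¬ k = j := fun hh => hj hh.symm
        simp [bkt_append, hk, hj, hkj]

theorem ipva_inv (xs : List String) :
    (xs.foldl ipvaStep ⟨PySem.Dict.empty, [], [], [], [], [], [], [], []⟩).l12 = bkt 1 xs ∧
    (xs.foldl ipvaStep ⟨PySem.Dict.empty, [], [], [], [], [], [], [], []⟩).l34 = bkt 2 xs ∧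
    (xs.foldl ipvaStep ⟨PySem.Dict.empty, [], [], [], [], [], [], [], []⟩).l5 = bkt 3 xs ∧
    (xs.foldl ipvaStep ⟨PySem.Dict.empty, [], [], [], [], [], [], [], []⟩).l6 = bkt 4 xs ∧
    (xs.foldl ipvaStep ⟨PySem.Dict.empty, [], [], [], [], [], [], [], []⟩).l7 = bkt 5 xs ∧
    (xs.foldl ipvaStep ⟨PySem.Dict.empty, [], [], [], [], [], [], [], []⟩).l8 = bkt 6 xs ∧
    (xs.foldl ipvaStep ⟨PySem.Dict.empty, [], [], [], [], [], [], [], []⟩).l9 = bkt 7 xs ∧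
    (xs.foldl ipvaStep ⟨PySem.Dict.empty, [], [], [], [], [], [], [], []⟩).l0 = bkt 8 xs ∧
    (xs.foldl ipvaStep ⟨PySem.Dict.empty, [], [], [], [], [], [], [], []⟩).dic.items
      = (xs.foldl ordStep []).map (fun k => (k, bkt k xs)) := by
  induction xs using List.reverseRecOn with
  | nil => exact ⟨rfl, rfl, rfl, rfl, rfl, rfl, rfl, rfl, rfl⟩
  | append_singleton xs a ih =>
    obtain ⟨i1, i2, i3, i4, i5, i6, i7, i8, i9⟩ := ih
    simp only [List.foldl_append, List.foldl_cons, List.foldl_nil]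
    set st := xs.foldl ipvaStep ⟨PySem.Dict.empty, [], [], [], [], [], [], [], []⟩ with hst
    rcases hg : PySem.List.pyGet? a.toList (-1) with _ | c
    · have hk : keyOf a = none := by simp [keyOf, PySem.Str.pyGet?, hg]
      have hstep : ipvaStep st a = st := by simp [ipvaStep, PySem.Str.pyGet?, hg]
      rw [hstep]
      refine ⟨?_, ?_, ?_, ?_, ?_, ?_, ?_, ?_, ?_⟩ <;>
        simp [ordStep, hk, bkt_append, i1, i2, i3, i4, i5, i6, i7, i8, i9]
    · have hkt := keyTable_get c
      have hko : keyOf a = keyTable.get? c := by simp [keyOf, PySem.Str.pyGet?, hg]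
      by_cases hA : (c == '1' || c == '2') = true
      · have hk : keyOf a = some 1 := by rw [hko, hkt]; simp [hA]
        have hstep : ipvaStep st a = { st with l12 := st.l12 ++ [a], dic := st.dic.insert 1 (st.l12 ++ [a]) } := by
          simp [ipvaStep, PySem.Str.pyGet?, hg, hA]
        rw [hstep]
        refine ⟨?_, ?_, ?_, ?_, ?_, ?_, ?_, ?_, ?_⟩
        · simp [bkt_append, hk, i1]
        · simp [bkt_append, hk, i2]
        · simp [bkt_append, hk, i3]
        · simp [bkt_append, hk, i4]
        · simp [bkt_append, hk, i5]
        · simp [bkt_append, hk, i6]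
        · simp [bkt_append, hk, i7]
        · simp [bkt_append, hk, i8]
        · show (st.dic.insert 1 (st.l12 ++ [a])).items = _
          rw [i1]
          exact dict_step xs a 1 _ hk i9
      by_cases hB : (c == '3' || c == '4') = true
      · have hk : keyOf a = some 2 := by rw [hko, hkt]; simp [hA, hB]
        have hstep : ipvaStep st a = { st with l34 := st.l34 ++ [a], dic := st.dic.insert 2 (st.l34 ++ [a]) } := by
          simp [ipvaStep, PySem.Str.pyGet?, hg, hA, hB]
        rw [hstep]
        refine ⟨?_, ?_, ?_, ?_, ?_, ?_, ?_, ?_, ?_⟩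
        · simp [bkt_append, hk, i1]
        · simp [bkt_append, hk, i2]
        · simp [bkt_append, hk, i3]
        · simp [bkt_append, hk, i4]
        · simp [bkt_append, hk, i5]
        · simp [bkt_append, hk, i6]
        · simp [bkt_append, hk, i7]
        · simp [bkt_append, hk, i8]
        · show (st.dic.insert 2 (st.l34 ++ [a])).items = _
          rw [i2]
          exact dict_step xs a 2 _ hk i9
      by_cases hC : (c == '5') = true
      · have hk : keyOf a = some 3 := by rw [hko, hkt]; simp [hA, hB, hC]
        have hstep : ipvaStep st a = { st with l5 := st.l5 ++ [a], dic := st.dic.insert 3 (st.l5 ++ [a]) } := by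
          simp [ipvaStep, PySem.Str.pyGet?, hg, hA, hB, hC]
        rw [hstep]
        refine ⟨?_, ?_, ?_, ?_, ?_, ?_, ?_, ?_, ?_⟩
        · simp [bkt_append, hk, i1]
        · simp [bkt_append, hk, i2]
        · simp [bkt_append, hk, i3]
        · simp [bkt_append, hk, i4]
        · simp [bkt_append, hk, i5]
        · simp [bkt_append, hk, i6]
        · simp [bkt_append, hk, i7]
        · simp [bkt_append, hk, i8]
        · show (st.dic.insert 3 (st.l5 ++ [a])).items = _
          rw [i3]
          exact dict_step xs a 3 _ hk i9
      by_cases hD : (c == '6') = true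
      · have hk : keyOf a = some 4 := by rw [hko, hkt]; simp [hA, hB, hC, hD]
        have hstep : ipvaStep st a = { st with l6 := st.l6 ++ [a], dic := st.dic.insert 4 (st.l6 ++ [a]) } := by
          simp [ipvaStep, PySem.Str.pyGet?, hg, hA, hB, hC, hD]
        rw [hstep]
        refine ⟨?_, ?_, ?_, ?_, ?_, ?_, ?_, ?_, ?_⟩
        · simp [bkt_append, hk, i1]
        · simp [bkt_append, hk, i2]
        · simp [bkt_append, hk, i3]
        · simp [bkt_append, hk, i4]
        · simp [bkt_append, hk, i5]
        · simp [bkt_append, hk, i6]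
        · simp [bkt_append, hk, i7]
        · simp [bkt_append, hk, i8]
        · show (st.dic.insert 4 (st.l6 ++ [a])).items = _
          rw [i4]
          exact dict_step xs a 4 _ hk i9
      by_cases hE : (c == '7') = true
      · have hk : keyOf a = some 5 := by rw [hko, hkt]; simp [hA, hB, hC, hD, hE]
        have hstep : ipvaStep st a = { st with l7 := st.l7 ++ [a], dic := st.dic.insert 5 (st.l7 ++ [a]) } := by
          simp [ipvaStep, PySem.Str.pyGet?, hg, hA, hB, hC, hD, hE]
        rw [hstep]
        refine ⟨?_, ?_, ?_, ?_, ?_, ?_, ?_, ?_, ?_⟩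
        · simp [bkt_append, hk, i1]
        · simp [bkt_append, hk, i2]
        · simp [bkt_append, hk, i3]
        · simp [bkt_append, hk, i4]
        · simp [bkt_append, hk, i5]
        · simp [bkt_append, hk, i6]
        · simp [bkt_append, hk, i7]
        · simp [bkt_append, hk, i8]
        · show (st.dic.insert 5 (st.l7 ++ [a])).items = _
          rw [i5]
          exact dict_step xs a 5 _ hk i9
      by_cases hF : (c == '8') = true
      · have hk : keyOf a = some 6 := by rw [hko, hkt]; simp [hA, hB, hC, hD, hE, hF]
        have hstep : ipvaStep st a = { st with l8 := st.l8 ++ [a], dic := st.dic.insert 6 (st.l8 ++ [a]) } := by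
          simp [ipvaStep, PySem.Str.pyGet?, hg, hA, hB, hC, hD, hE, hF]
        rw [hstep]
        refine ⟨?_, ?_, ?_, ?_, ?_, ?_, ?_, ?_, ?_⟩
        · simp [bkt_append, hk, i1]
        · simp [bkt_append, hk, i2]
        · simp [bkt_append, hk, i3]
        · simp [bkt_append, hk, i4]
        · simp [bkt_append, hk, i5]
        · simp [bkt_append, hk, i6]
        · simp [bkt_append, hk, i7]
        · simp [bkt_append, hk, i8]
        · show (st.dic.insert 6 (st.l8 ++ [a])).items = _
          rw [i6]
          exact dict_step xs a 6 _ hk i9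
      by_cases hG : (c == '9') = true
      · have hk : keyOf a = some 7 := by rw [hko, hkt]; simp [hA, hB, hC, hD, hE, hF, hG]
        have hstep : ipvaStep st a = { st with l9 := st.l9 ++ [a], dic := st.dic.insert 7 (st.l9 ++ [a]) } := by
          simp [ipvaStep, PySem.Str.pyGet?, hg, hA, hB, hC, hD, hE, hF, hG]
        rw [hstep]
        refine ⟨?_, ?_, ?_, ?_, ?_, ?_, ?_, ?_, ?_⟩
        · simp [bkt_append, hk, i1]
        · simp [bkt_append, hk, i2]
        · simp [bkt_append, hk, i3]
        · simp [bkt_append, hk, i4]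
        · simp [bkt_append, hk, i5]
        · simp [bkt_append, hk, i6]
        · simp [bkt_append, hk, i7]
        · simp [bkt_append, hk, i8]
        · show (st.dic.insert 7 (st.l9 ++ [a])).items = _
          rw [i7]
          exact dict_step xs a 7 _ hk i9
      by_cases hH : (c == '0') = true
      · have hk : keyOf a = some 8 := by rw [hko, hkt]; simp [hA, hB, hC, hD, hE, hF, hG, hH]
        have hstep : ipvaStep st a = { st with l0 := st.l0 ++ [a], dic := st.dic.insert 8 (st.l0 ++ [a]) } := by
          simp [ipvaStep, PySem.Str.pyGet?, hg, hA, hB, hC, hD, hE, hF, hG, hH]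
        rw [hstep]
        refine ⟨?_, ?_, ?_, ?_, ?_, ?_, ?_, ?_, ?_⟩
        · simp [bkt_append, hk, i1]
        · simp [bkt_append, hk, i2]
        · simp [bkt_append, hk, i3]
        · simp [bkt_append, hk, i4]
        · simp [bkt_append, hk, i5]
        · simp [bkt_append, hk, i6]
        · simp [bkt_append, hk, i7]
        · simp [bkt_append, hk, i8]
        · show (st.dic.insert 8 (st.l0 ++ [a])).items = _
          rw [i8]
          exact dict_step xs a 8 _ hk i9
      -- no digit matched: state unchanged
      have hk : keyOf a = none := by rw [hko, hkt]; simp [hA, hB, hC, hD, hE, hF, hG, hH]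
      have hstep : ipvaStep st a = st := by
        simp [ipvaStep, PySem.Str.pyGet?, hg, hA, hB, hC, hD, hE, hF, hG, hH]
      rw [hstep]
      refine ⟨?_, ?_, ?_, ?_, ?_, ?_, ?_, ?_, ?_⟩ <;>
        simp [ordStep, hk, bkt_append, i1, i2, i3, i4, i5, i6, i7, i8, i9]

-- ===== VERDICT (by name: the statement is the Claim_ definition above) =====
theorem ipva_spec : Claim_equal_ipva := by
  intro listas _ _
  unfold Spec_ipva ipva ipva_alt
  exact (ipva_inv listas).2.2.2.2.2.2.2.2
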